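-- pv_equiv track=rewrite | github.com/gridvisi/Python_workspace | 测试题目/2019-2020/万年历.py | getTotalDays
-- ===== SOURCE A (Python) =====
-- def leap_year(year):#判断平瑞年
--   if year%4==0 and year%100!=0 or year%400==0:
--     return True
--   else:
--     return False
--
-- def getMonthDays(year,month):#得到每个年份每月的天数
--   days = 31
--   if month == 2 :
--     if leap_year(year):
--       days=29
--     else:
--       days=28
--   elif month==4 or month==6 or month==9 or month==11:
--     days=30
--   return days
--
-- def getTotalDays(year,month):#计算星期
--   totalDays=0
--   for i in range(1,year):
--     if leap_year(i):
--       totalDays += 366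
--     else:
--       totalDays += 365
--   for i in range(1,month):
--     totalDays +=getMonthDays(year,i)
--   return totalDays
-- ===== SOURCE B (Python) =====
-- def getTotalDays(year, month):
--     total = 0
--     if year > 1:
--         y = year - 1
--         total = 365 * y + y // 4 - y // 100 + y // 400
--     if month > 1:
--         total += 31 * (month - 1)
--         if month > 2:
--             total -= 2 if (year % 4 == 0 and year % 100 != 0 or year % 400 == 0) else 3
--         total -= sum(1 for k in (4, 6, 9, 11) if k < month)
--     return total
-- ===== Notes on version B (the rewrite author's own statement) =====
-- stated objective: faster
-- what changed: Replaced the O(year) loop counting leap years and the O(month) loop summing month lengths with a closed-form arithmetic formula (365*(year-1) + leap-year divisibility counts, plus 31*(month-1) with constant corrections for February and the 30-day months).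
import Mathlib
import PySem

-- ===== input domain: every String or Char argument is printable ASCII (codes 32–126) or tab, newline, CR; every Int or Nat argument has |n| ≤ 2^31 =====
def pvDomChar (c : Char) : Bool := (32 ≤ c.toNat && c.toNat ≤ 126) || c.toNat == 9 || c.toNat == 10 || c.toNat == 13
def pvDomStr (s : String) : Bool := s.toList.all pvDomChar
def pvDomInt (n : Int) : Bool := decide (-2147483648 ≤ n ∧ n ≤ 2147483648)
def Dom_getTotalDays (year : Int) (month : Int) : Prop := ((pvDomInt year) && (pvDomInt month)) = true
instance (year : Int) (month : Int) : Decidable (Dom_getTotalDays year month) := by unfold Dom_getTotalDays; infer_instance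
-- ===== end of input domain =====

-- B replaces A's two linear loops by a closed-form O(1) arithmetic formula; return values are identical.

-- ===== PORT A =====
def leap_year (year : Int) : Bool :=
  if (PySem.Int.mod year 4 == 0 && PySem.Int.mod year 100 != 0) || PySem.Int.mod year 400 == 0 then
    true
  else
    false

def getMonthDays (year : Int) (month : Int) : Int :=
  let days : Int := 31
  let days := if month == 2 then (if leap_year year then (29:Int) else 28)
    else if month == 4 || month == 6 || month == 9 || month == 11 then 30
    else days
  days

def getTotalDays (year : Int) (month : Int) : Int :=
  let totalDays : Int := 0
  let totalDays := (PySem.List.pyRange 1 year 1).foldl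
    (fun acc i => if leap_year i then acc + 366 else acc + 365) totalDays
  let totalDays := (PySem.List.pyRange 1 month 1).foldl
    (fun acc i => acc + getMonthDays year i) totalDays
  totalDays

-- ===== PORT B =====
def getTotalDays_alt (year : Int) (month : Int) : Int :=
  let total : Int := 0
  let total := if year > 1 then
      let y := year - 1
      365 * y + PySem.Int.floordiv y 4 - PySem.Int.floordiv y 100 + PySem.Int.floordiv y 400
    else total
  let total := if month > 1 then
      let total := total + 31 * (month - 1)
      let total := if month > 2 then
          total - (if (PySem.Int.mod year 4 == 0 && PySem.Int.mod year 100 != 0) || PySem.Int.mod year 400 == 0 then (2:Int) else 3)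
        else total
      total - (([4, 6, 9, 11] : List Int).filter (fun k => k < month)).length
    else total
  total

-- ===== PRECONDITION & SPEC =====
def Spec_getTotalDays (year : Int) (month : Int) (out : Int) : Prop := out = getTotalDays_alt year month
instance (year : Int) (month : Int) (out : Int) : Decidable (Spec_getTotalDays year month out) := by unfold Spec_getTotalDays; infer_instance

-- ===== CLAIM (what is proved, stated in full; the proofs are below) =====
def Claim_equal_getTotalDays : Prop := ∀ (year : Int) (month : Int), Dom_getTotalDays year month → Spec_getTotalDays year month (getTotalDays year month)

-- ===== LEMMAS AND PROOFS =====
-- the 2/3 subtracted for February in B's formula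
def febAdj (year : Int) : Int :=
  if (PySem.Int.mod year 4 == 0 && PySem.Int.mod year 100 != 0) || PySem.Int.mod year 400 == 0 then 2 else 3

-- number of 30-day month indices below `month`
def mcount (month : Int) : Int := ((([4, 6, 9, 11] : List Int).filter (fun k => k < month)).length : Int)

-- B's month-part contribution
def mpart (year month : Int) : Int := 31 * (month - 1) - (if month > 2 then febAdj year else 0) - mcount month

theorem alt_eq (year month : Int) :
    getTotalDays_alt year month =
      (if year > 1 then
        365 * (year - 1) + PySem.Int.floordiv (year - 1) 4 - PySem.Int.floordiv (year - 1) 100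
          + PySem.Int.floordiv (year - 1) 400
       else 0)
      + (if month > 1 then mpart year month else 0) := by
  unfold getTotalDays_alt mpart febAdj mcount
  split_ifs <;> simp_all <;> ring

theorem leap_iff (y : Int) :
    leap_year y = true ↔ (y % 4 = 0 ∧ ¬ y % 100 = 0) ∨ y % 400 = 0 := by
  unfold leap_year
  simp only [PySem.Int.mod_eq_emod_of_pos (show (0:Int) < 4 by norm_num),
      PySem.Int.mod_eq_emod_of_pos (show (0:Int) < 100 by norm_num),
      PySem.Int.mod_eq_emod_of_pos (show (0:Int) < 400 by norm_num)]
  simp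
  try tauto

theorem year_loop (n : Nat) :
    (PySem.List.pyRange 1 (1 + (n : Int)) 1).foldl
      (fun acc i => if leap_year i then acc + 366 else acc + 365) 0
    = 365 * (n : Int) + PySem.Int.floordiv (n : Int) 4 - PySem.Int.floordiv (n : Int) 100
        + PySem.Int.floordiv (n : Int) 400 := by
  induction n with
  | zero => simp [PySem.List.pyRange_one_eq_nil, PySem.Int.floordiv]
  | succ k ih =>
    have h1 : (1 : Int) ≤ 1 + (k : Int) := by omega
    have hr : (1 : Int) + ((k : Nat) + 1 : Nat) = (1 + (k : Int)) + 1 := by push_cast; ring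
    rw [hr, PySem.List.pyRange_one_succ_right h1, List.foldl_append, ih]
    simp only [List.foldl]
    simp only [PySem.Int.floordiv_eq_ediv_of_pos (show (0:Int) < 4 by norm_num),
        PySem.Int.floordiv_eq_ediv_of_pos (show (0:Int) < 100 by norm_num),
        PySem.Int.floordiv_eq_ediv_of_pos (show (0:Int) < 400 by norm_num)]
    push_cast
    rw [show (1:Int) + (k : Int) = (k : Int) + 1 from by ring]
    by_cases hL : leap_year ((k : Int) + 1) = true
    · have hp := (leap_iff ((k : Int) + 1)).1 hL
      simp only [hL, if_true]
      omega
    · have hnp : ¬ ((((k : Int) + 1) % 4 = 0 ∧ ¬ ((k : Int) + 1) % 100 = 0) ∨ ((k : Int) + 1) % 400 = 0) := by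
        rw [← leap_iff]; simp [hL]
      simp only [hL, if_false, Bool.false_eq_true]
      omega

theorem getMonthDays_ge12 (year month : Int) (h : 12 ≤ month) : getMonthDays year month = 31 := by
  unfold getMonthDays
  have h2 : ¬ (month == 2) = true := by simp; omega
  have h4 : ¬ (month == 4 || month == 6 || month == 9 || month == 11) = true := by simp; omega
  simp only [h2, h4, if_false, Bool.false_eq_true]

theorem mpart_step (year month : Int) (h : 1 ≤ month) :
    mpart year (month + 1) = mpart year month + getMonthDays year month := by
  by_cases h12 : 12 ≤ month
  · rw [getMonthDays_ge12 year month h12]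
    unfold mpart mcount
    have c1 : (([4, 6, 9, 11] : List Int).filter (fun k => k < month)) = [4, 6, 9, 11] := by
      simp [List.filter_eq_self]; omega
    have c2 : (([4, 6, 9, 11] : List Int).filter (fun k => k < month + 1)) = [4, 6, 9, 11] := by
      simp [List.filter_eq_self]; omega
    rw [c1, c2]
    have hg : month > 2 := by omega
    have hg' : month + 1 > 2 := by omega
    rw [if_pos hg, if_pos hg']
    ring
  · have hub : month ≤ 11 := by omega
    unfold mpart mcount getMonthDays febAdj leap_year
    interval_cases month <;>
      · simp only [List.filter]
        norm_num
        try (split_ifs <;> norm_num)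



theorem month_loop (year : Int) (m : Nat) (t : Int) :
    (PySem.List.pyRange 1 (1 + (m : Int)) 1).foldl (fun acc i => acc + getMonthDays year i) t
    = t + mpart year (1 + (m : Int)) := by
  induction m generalizing t with
  | zero =>
    simp [PySem.List.pyRange_one_eq_nil, mpart, mcount, List.filter]
  | succ k ih =>
    rw [show (1 : Int) + ((k + 1 : Nat) : Int) = (1 + (k : Int)) + 1 from by push_cast; ring,
        PySem.List.pyRange_one_succ_right (by omega), List.foldl_append, ih]
    simp only [List.foldl]
    rw [mpart_step year (1 + (k : Int)) (by omega)]
    ring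

theorem year_part (year : Int) :
    (PySem.List.pyRange 1 year 1).foldl
      (fun acc i => if leap_year i then acc + 366 else acc + 365) 0
    = (if year > 1 then
        365 * (year - 1) + PySem.Int.floordiv (year - 1) 4 - PySem.Int.floordiv (year - 1) 100
          + PySem.Int.floordiv (year - 1) 400
       else 0) := by
  by_cases hy : 1 < year
  · obtain ⟨n, hn⟩ : ∃ n : Nat, year = 1 + (n : Int) := ⟨(year - 1).toNat, by omega⟩
    rw [if_pos hy, hn, year_loop]
    norm_num
  · rw [if_neg hy, PySem.List.pyRange_one_eq_nil (by omega)]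
    simp

theorem month_part (year month t : Int) :
    (PySem.List.pyRange 1 month 1).foldl (fun acc i => acc + getMonthDays year i) t
    = t + (if month > 1 then mpart year month else 0) := by
  by_cases hm : 1 < month
  · obtain ⟨n, hn⟩ : ∃ n : Nat, month = 1 + (n : Int) := ⟨(month - 1).toNat, by omega⟩
    rw [if_pos hm, hn, month_loop]
  · rw [if_neg hm, PySem.List.pyRange_one_eq_nil (by omega)]
    simp

-- ===== VERDICT (by name: the statement is the Claim_ definition above) =====
theorem getTotalDays_spec : Claim_equal_getTotalDays := by
  unfold Claim_equal_getTotalDays Spec_getTotalDays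
  intro year month _
  rw [alt_eq]
  show (getTotalDays year month) = _
  simp only [getTotalDays]
  rw [month_part, year_part]
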